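-- pv_equiv track=rewrite | github.com/thecyborganizer/hisat-genotype | hisatgenotype_modules/hisatgenotype_typing_core.py | get_exonic_vars
-- ===== SOURCE A (Python) =====
-- def get_exonic_vars(Vars, exons):
--     vars = set()
--     for var_id, var in Vars.items():
--         var_type, var_left, var_data = var
--         var_right = var_left
--         if var_type == "deletion":
--             var_right = var_left + int(var_data) - 1
--         for exon_left, exon_right in exons:
--             if var_left >= exon_left and var_right <= exon_right:
--                 vars.add(var_id)
--
--     return vars
-- ===== SOURCE B (Python) =====
-- def get_exonic_vars(Vars, exons):
--     # Sort exons by start once and keep a running (prefix) maximum of ends;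
--     # then each variant is answered with one binary search instead of a scan.
--     ex = sorted(exons, key=lambda e: e[0])
--     starts = []
--     best = []
--     m = None
--     for a, b in ex:
--         if m is None or b > m:
--             m = b
--         starts.append(a)
--         best.append(m)
--     found = set()
--     for var_id, var in Vars.items():
--         var_type, var_left, var_data = var
--         var_right = var_left
--         if var_type == "deletion":
--             var_right = var_left + int(var_data) - 1
--         # rightmost insertion point: number of sorted starts <= var_left
--         lo, hi = 0, len(starts)
--         while lo < hi:
--             mid = (lo + hi) // 2
--             if var_left < starts[mid]:
--                 hi = mid
--             else:
--                 lo = mid + 1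
--         if lo > 0 and var_right <= best[lo - 1]:
--             found.add(var_id)
--     return found
-- ===== Notes on version B (the rewrite author's own statement) =====
-- stated objective: faster
-- what changed: B sorts the exons once by start, precomputes a prefix-maximum of exon ends, and answers each variant's containment test with one binary search instead of scanning every exon per variant.
import Mathlib
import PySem

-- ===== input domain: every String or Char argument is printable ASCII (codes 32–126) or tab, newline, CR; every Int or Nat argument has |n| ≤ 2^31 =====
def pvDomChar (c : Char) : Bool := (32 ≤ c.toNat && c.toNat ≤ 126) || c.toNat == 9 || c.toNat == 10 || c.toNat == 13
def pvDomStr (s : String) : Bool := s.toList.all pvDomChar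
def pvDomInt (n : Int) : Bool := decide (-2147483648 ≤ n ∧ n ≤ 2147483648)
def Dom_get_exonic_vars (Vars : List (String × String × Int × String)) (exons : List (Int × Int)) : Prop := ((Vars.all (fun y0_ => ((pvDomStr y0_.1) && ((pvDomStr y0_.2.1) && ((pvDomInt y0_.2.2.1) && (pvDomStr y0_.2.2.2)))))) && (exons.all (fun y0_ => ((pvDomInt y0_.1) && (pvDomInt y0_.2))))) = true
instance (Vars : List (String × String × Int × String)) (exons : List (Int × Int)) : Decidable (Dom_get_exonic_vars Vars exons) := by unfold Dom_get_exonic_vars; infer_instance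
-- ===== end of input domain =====

-- B replaces A's per-variant scan of all exons by one sort of the exons plus a
-- prefix-maximum of exon ends and a binary search per variant (objective: faster).

-- ===== PORT A =====
-- A iterates over the dict Vars (duplicate keys in the association list collapse
-- as in Python's dict(...)); int(var_data) is total here only under Pre_ below.
def get_exonic_vars (Vars : List (String × String × Int × String)) (exons : List (Int × Int)) : List String :=
  ((PySem.Dict.ofList Vars).items).foldl
    (fun vars it =>
      let var_type := it.2.1
      let var_left := it.2.2.1
      let var_data := it.2.2.2
      let var_right := if var_type == "deletion" then var_left + ((PySem.Int.ofStr? var_data).getD 0) - 1 else var_left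
      exons.foldl
        (fun vars e =>
          if var_left ≥ e.1 ∧ var_right ≤ e.2 then PySem.Set.add vars it.1 else vars)
        vars)
    PySem.Set.empty

-- ===== PORT B =====
-- one step of B's scan that builds the sorted start list and the prefix maxima of ends
def pvScanStep (acc : List Int × List Int × Option Int) (e : Int × Int) : List Int × List Int × Option Int :=
  let m' := match acc.2.2 with
    | none => e.2
    | some mv => if e.2 > mv then e.2 else mv
  (acc.1 ++ [e.1], acc.2.1 ++ [m'], some m')

-- B's hand-written bisect_right loop (lo, hi are nonnegative throughout in the Python,
-- so Nat with Nat division matches Python's // exactly here)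
def pvBisect (starts : List Int) (x : Int) (lo hi : Nat) : Nat :=
  if h : lo < hi then
    let mid := (lo + hi) / 2
    if x < starts.getD mid 0 then pvBisect starts x lo mid
    else pvBisect starts x (mid + 1) hi
  else lo
termination_by hi - lo
decreasing_by all_goals omega

def get_exonic_vars_alt (Vars : List (String × String × Int × String)) (exons : List (Int × Int)) : List String :=
  let ex := PySem.List.sorted exons (fun e => e.1) false
  let sbm := ex.foldl pvScanStep ([], [], none)
  let starts := sbm.1
  let best := sbm.2.1
  ((PySem.Dict.ofList Vars).items).foldl
    (fun vars it =>
      let var_type := it.2.1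
      let var_left := it.2.2.1
      let var_data := it.2.2.2
      let var_right := if var_type == "deletion" then var_left + ((PySem.Int.ofStr? var_data).getD 0) - 1 else var_left
      let lo := pvBisect starts var_left 0 starts.length
      if 0 < lo ∧ var_right ≤ best.getD (lo - 1) 0 then PySem.Set.add vars it.1 else vars)
    PySem.Set.empty

-- ===== PRECONDITION & SPEC =====
-- Pre_ excludes exactly the inputs on which Python A raises ValueError:
-- a variant of type "deletion" (after dict collapsing) whose var_data is not int-parsable.
def Pre_get_exonic_vars (Vars : List (String × String × Int × String)) (exons : List (Int × Int)) : Prop :=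
  ∀ it ∈ (PySem.Dict.ofList Vars).items, it.2.1 = "deletion" → (PySem.Int.ofStr? it.2.2.2).isSome
instance (Vars : List (String × String × Int × String)) (exons : List (Int × Int)) : Decidable (Pre_get_exonic_vars Vars exons) := by unfold Pre_get_exonic_vars; infer_instance

def pvWitness_get_exonic_vars : (List (String × String × Int × String)) × (List (Int × Int)) :=
  ([("v1", "deletion", 3, "2"), ("v2", "single", 7, "A")], [(1, 5), (6, 9)])

def Spec_get_exonic_vars (Vars : List (String × String × Int × String)) (exons : List (Int × Int)) (out : List String) : Prop := out = get_exonic_vars_alt Vars exons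
instance (Vars : List (String × String × Int × String)) (exons : List (Int × Int)) (out : List String) : Decidable (Spec_get_exonic_vars Vars exons out) := by unfold Spec_get_exonic_vars; infer_instance

-- ===== CLAIM (what is proved, stated in full; the proofs are below) =====
def Claim_equal_get_exonic_vars : Prop := ∀ (Vars : List (String × String × Int × String)) (exons : List (Int × Int)), Dom_get_exonic_vars Vars exons → Pre_get_exonic_vars Vars exons → Spec_get_exonic_vars Vars exons (get_exonic_vars Vars exons)

-- ===== LEMMAS AND PROOFS =====

theorem pvSet_add_idem (s : PySem.Set String) (x : String) :
    PySem.Set.add (PySem.Set.add s x) x = PySem.Set.add s x := by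
  by_cases hm : x ∈ s <;>
    simp [PySem.Set.add, PySem.Set.contains, hm]

-- A's inner loop over the exons adds it.1 exactly when some exon contains the variant
theorem pvInner (exons : List (Int × Int)) (l r : Int) (id : String) (vars : PySem.Set String) :
    exons.foldl (fun vars e => if l ≥ e.1 ∧ r ≤ e.2 then PySem.Set.add vars id else vars) vars
      = if ∃ e ∈ exons, l ≥ e.1 ∧ r ≤ e.2 then PySem.Set.add vars id else vars := by
  induction exons generalizing vars with
  | nil => simp
  | cons e t ih =>
    simp only [List.foldl_cons]
    by_cases h : l ≥ e.1 ∧ r ≤ e.2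
    · rw [if_pos h, ih]
      have hex : ∃ e' ∈ e :: t, l ≥ e'.1 ∧ r ≤ e'.2 := ⟨e, List.mem_cons_self, h⟩
      rw [if_pos hex]
      by_cases ht : ∃ e' ∈ t, l ≥ e'.1 ∧ r ≤ e'.2
      · rw [if_pos ht, pvSet_add_idem]
      · rw [if_neg ht]
    · rw [if_neg h, ih]
      have : (∃ e' ∈ e :: t, l ≥ e'.1 ∧ r ≤ e'.2) ↔ (∃ e' ∈ t, l ≥ e'.1 ∧ r ≤ e'.2) := by
        constructor
        · rintro ⟨e', he', hc⟩
          rcases List.mem_cons.mp he' with rfl | hm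
          · exact absurd hc h
          · exact ⟨e', hm, hc⟩
        · rintro ⟨e', he', hc⟩; exact ⟨e', List.mem_cons_of_mem _ he', hc⟩
      rw [if_congr this rfl rfl]

-- the pure prefix-maximum list that B's scan computes
def pvPM (m : Int) : List (Int × Int) → List Int
  | [] => []
  | e :: t => (max m e.2) :: pvPM (max m e.2) t

def pvBest : List (Int × Int) → List Int
  | [] => []
  | e :: t => e.2 :: pvPM e.2 t

theorem pvScanStep_some (acc1 acc2 : List Int) (m : Int) (e : Int × Int) :
    pvScanStep (acc1, acc2, some m) e = (acc1 ++ [e.1], acc2 ++ [max m e.2], some (max m e.2)) := by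
  have hm : (if e.2 > m then e.2 else m) = max m e.2 := by split <;> omega
  simp [pvScanStep, hm]

theorem pvScan_some (ex : List (Int × Int)) : ∀ (s0 b0 : List Int) (m0 : Int),
    ∃ mf, ex.foldl pvScanStep (s0, b0, some m0) = (s0 ++ ex.map (·.1), b0 ++ pvPM m0 ex, some mf) := by
  induction ex with
  | nil => intro s0 b0 m0; exact ⟨m0, by simp [pvPM]⟩
  | cons e t ih =>
    intro s0 b0 m0
    obtain ⟨mf, hmf⟩ := ih (s0 ++ [e.1]) (b0 ++ [max m0 e.2]) (max m0 e.2)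
    refine ⟨mf, ?_⟩
    simp only [List.foldl_cons, pvScanStep_some, hmf, pvPM, List.map_cons]
    simp

theorem pvScan_eq (ex : List (Int × Int)) :
    ∃ mo, ex.foldl pvScanStep ([], [], none) = (ex.map (·.1), pvBest ex, mo) := by
  cases ex with
  | nil => exact ⟨none, rfl⟩
  | cons e t =>
    have h1 : pvScanStep ([], [], none) e = ([e.1], [e.2], some e.2) := by simp [pvScanStep]
    obtain ⟨mf, hmf⟩ := pvScan_some t [e.1] [e.2] e.2
    refine ⟨some mf, ?_⟩
    simp only [List.foldl_cons, h1, hmf, pvBest, List.map_cons]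
    simp

theorem pvPM_ge (m : Int) (t : List (Int × Int)) :
    ∀ k, k < t.length → m ≤ (pvPM m t).getD k 0 := by
  induction t generalizing m with
  | nil => intro k hk; simp at hk
  | cons e t ih =>
    intro k hk
    cases k with
    | zero => simp [pvPM]
    | succ k =>
      have := ih (max m e.2) k (by simpa using hk)
      simp only [pvPM, List.getD_cons_succ]
      omega

theorem pvPM_ub (m : Int) (t : List (Int × Int)) :
    ∀ k, k < t.length → ∀ j, j ≤ k → (t.getD j (0, 0)).2 ≤ (pvPM m t).getD k 0 := by
  induction t generalizing m with
  | nil => intro k hk; simp at hk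
  | cons e t ih =>
    intro k hk j hj
    cases k with
    | zero =>
      interval_cases j
      simp [pvPM]
    | succ k =>
      cases j with
      | zero =>
        have := pvPM_ge (max m e.2) t k (by simpa using hk)
        simp only [pvPM, List.getD_cons_succ, List.getD_cons_zero]
        omega
      | succ j =>
        have := ih (max m e.2) k (by simpa using hk) j (by omega)
        simpa [pvPM] using this

theorem pvPM_att (m : Int) (t : List (Int × Int)) :
    ∀ k, k < t.length → (pvPM m t).getD k 0 = m ∨ ∃ j ≤ k, (pvPM m t).getD k 0 = (t.getD j (0, 0)).2 := by
  induction t generalizing m with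
  | nil => intro k hk; simp at hk
  | cons e t ih =>
    intro k hk
    cases k with
    | zero =>
      rcases (by omega : e.2 ≤ m ∨ m < e.2) with h | h
      · left; simp [pvPM]; omega
      · right; exact ⟨0, le_refl _, by simp [pvPM]; omega⟩
    | succ k =>
      rcases ih (max m e.2) k (by simpa using hk) with h | ⟨j, hj, h⟩
      · rcases (by omega : e.2 ≤ m ∨ m < e.2) with h2 | h2
        · left; simp only [pvPM, List.getD_cons_succ]; omega
        · right; refine ⟨0, by omega, ?_⟩
          simp only [pvPM, List.getD_cons_succ, List.getD_cons_zero]; omega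
      · right; exact ⟨j + 1, by omega, by simpa [pvPM] using h⟩

theorem pvBest_ub (ex : List (Int × Int)) :
    ∀ k, k < ex.length → ∀ j, j ≤ k → (ex.getD j (0, 0)).2 ≤ (pvBest ex).getD k 0 := by
  cases ex with
  | nil => intro k hk; simp at hk
  | cons e t =>
    intro k hk j hj
    cases k with
    | zero => interval_cases j; simp [pvBest]
    | succ k =>
      cases j with
      | zero =>
        have := pvPM_ge e.2 t k (by simpa using hk)
        simp only [pvBest, List.getD_cons_succ, List.getD_cons_zero]
        omega
      | succ j =>
        have := pvPM_ub e.2 t k (by simpa using hk) j (by omega)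
        simpa [pvBest] using this

theorem pvBest_att (ex : List (Int × Int)) :
    ∀ k, k < ex.length → ∃ j ≤ k, (pvBest ex).getD k 0 = (ex.getD j (0, 0)).2 := by
  cases ex with
  | nil => intro k hk; simp at hk
  | cons e t =>
    intro k hk
    cases k with
    | zero => exact ⟨0, le_refl _, by simp [pvBest]⟩
    | succ k =>
      rcases pvPM_att e.2 t k (by simpa using hk) with h | ⟨j, hj, h⟩
      · exact ⟨0, by omega, by simpa [pvBest] using h⟩
      · exact ⟨j + 1, by omega, by simpa [pvBest] using h⟩

theorem pvBisect_spec (s : List Int) (x : Int)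
    (hs : ∀ p q, p ≤ q → q < s.length → s.getD p 0 ≤ s.getD q 0) :
    ∀ (n lo hi : Nat), hi - lo ≤ n → lo ≤ hi → hi ≤ s.length →
    (∀ j, j < lo → s.getD j 0 ≤ x) → (∀ j, hi ≤ j → j < s.length → x < s.getD j 0) →
    lo ≤ pvBisect s x lo hi ∧ pvBisect s x lo hi ≤ hi ∧
    (∀ j, j < pvBisect s x lo hi → s.getD j 0 ≤ x) ∧
    (∀ j, pvBisect s x lo hi ≤ j → j < s.length → x < s.getD j 0) := by
  intro n
  induction n with
  | zero =>
    intro lo hi h0 hle hhi hlow hhigh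
    have hnl : ¬ lo < hi := by omega
    rw [pvBisect, dif_neg hnl]
    exact ⟨le_refl _, hle, hlow, fun j hj hjl => hhigh j (by omega) hjl⟩
  | succ n ih =>
    intro lo hi hn hle hhi hlow hhigh
    by_cases h : lo < hi
    · rw [pvBisect, dif_pos h]
      simp only
      by_cases hc : x < s.getD ((lo + hi) / 2) 0
      · rw [if_pos hc]
        obtain ⟨h1, h2, h3, h4⟩ := ih lo ((lo + hi) / 2) (by omega) (by omega) (by omega) hlow
          (fun j hj hjl => lt_of_lt_of_le hc (hs _ j (by omega) hjl))
        exact ⟨h1, by omega, h3, h4⟩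
      · rw [if_neg hc]
        rw [Int.not_lt] at hc
        obtain ⟨h1, h2, h3, h4⟩ := ih ((lo + hi) / 2 + 1) hi (by omega) (by omega) hhi
          (fun j hj => le_trans (hs j ((lo + hi) / 2) (by omega) (by omega)) hc) hhigh
        exact ⟨by omega, h2, h3, h4⟩
    · rw [pvBisect, dif_neg h]
      exact ⟨le_refl _, hle, hlow, fun j hj hjl => hhigh j (by omega) hjl⟩

-- the per-variant condition: some exon contains [l, r] iff B's binary-search test succeeds
theorem pvCond (exons : List (Int × Int)) (l r : Int) :
    (∃ e ∈ exons, l ≥ e.1 ∧ r ≤ e.2) ↔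
      (0 < pvBisect ((PySem.List.sorted exons (fun e => e.1) false).map (·.1)) l 0
            ((PySem.List.sorted exons (fun e => e.1) false).map (·.1)).length ∧
        r ≤ (pvBest (PySem.List.sorted exons (fun e => e.1) false)).getD
            (pvBisect ((PySem.List.sorted exons (fun e => e.1) false).map (·.1)) l 0
              ((PySem.List.sorted exons (fun e => e.1) false).map (·.1)).length - 1) 0) := by
  set ex := PySem.List.sorted exons (fun e => e.1) false with hex
  set starts := ex.map (·.1) with hstarts
  have hlen : starts.length = ex.length := by simp [hstarts]
  have hget : ∀ k, k < ex.length → starts.getD k 0 = (ex.getD k (0, 0)).1 := by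
    intro k hk
    rw [hstarts, List.getD_eq_getElem _ _ (by simpa using hk), List.getD_eq_getElem _ _ hk]
    simp
  have hpair : List.Pairwise (fun a b : Int × Int => a.1 ≤ b.1) ex :=
    PySem.List.sorted_pairwise exons (fun e => e.1)
  have hmono : ∀ p q, p ≤ q → q < starts.length → starts.getD p 0 ≤ starts.getD q 0 := by
    intro p q hpq hq
    rw [hget p (by omega), hget q (by omega)]
    rcases eq_or_lt_of_le hpq with rfl | hlt
    · exact le_refl _
    · have := List.pairwise_iff_getElem.mp hpair p q (by omega) (by omega) hlt
      rwa [List.getD_eq_getElem _ _ (by omega), List.getD_eq_getElem _ _ (by omega)]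
  set i := pvBisect starts l 0 starts.length with hi
  obtain ⟨_, hile, hbelow, habove⟩ :=
    pvBisect_spec starts l hmono starts.length 0 starts.length (by omega) (by omega)
      (le_refl _) (by omega) (by omega)
  have hmem : (∃ e ∈ exons, l ≥ e.1 ∧ r ≤ e.2) ↔ ∃ e ∈ ex, l ≥ e.1 ∧ r ≤ e.2 := by
    constructor
    · rintro ⟨e, he, hc⟩; exact ⟨e, (PySem.List.mem_sorted exons (fun e => e.1) false e).mpr he, hc⟩
    · rintro ⟨e, he, hc⟩; exact ⟨e, (PySem.List.mem_sorted exons (fun e => e.1) false e).mp he, hc⟩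
  rw [hmem]
  constructor
  · rintro ⟨e, he, h1, h2⟩
    obtain ⟨k, hk, rfl⟩ := List.mem_iff_getElem.mp he
    have hklen : k < ex.length := hk
    have hki : k < i := by
      by_contra hni
      have := habove k (by omega) (by omega)
      rw [hget k hklen, List.getD_eq_getElem _ _ hklen] at this
      omega
    refine ⟨by omega, ?_⟩
    have hub := pvBest_ub ex (i - 1) (by omega) k (by omega)
    rw [List.getD_eq_getElem _ _ hklen] at hub
    omega
  · rintro ⟨hipos, hr⟩
    obtain ⟨j, hj, hatt⟩ := pvBest_att ex (i - 1) (by omega)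
    have hjlen : j < ex.length := by omega
    have hjx : starts.getD j 0 ≤ l := hbelow j (by omega)
    rw [hget j hjlen] at hjx
    refine ⟨ex[j], List.getElem_mem hjlen, ?_, ?_⟩
    · rwa [List.getD_eq_getElem _ _ hjlen] at hjx
    · rw [hatt, List.getD_eq_getElem _ _ hjlen] at hr
      exact hr

-- ===== VERDICT (by name: the statement is the Claim_ definition above) =====
theorem get_exonic_vars_spec : Claim_equal_get_exonic_vars := by
  intro Vars exons _ _
  unfold Spec_get_exonic_vars get_exonic_vars get_exonic_vars_alt
  simp only
  obtain ⟨mo, hscan⟩ := pvScan_eq (PySem.List.sorted exons (fun e => e.1) false)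
  rw [hscan]
  simp only
  congr 1
  funext vars it
  rw [pvInner]
  exact if_congr (pvCond exons it.2.2.1 _) rfl rfl
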